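-- pv_equiv track=rewrite | github.com/AnaghaSarmalkar/Assessment | main.py | formatted_string
-- ===== SOURCE A (Python) =====
-- def formatted_string(input_string, sorted_count):
--     new_string_list = []
--     for key, value in sorted_count.items():
--         # Refer the input string to get the appropriate letter case
--         for og_key in input_string:
--             if key.lower() == og_key.lower():
--                 new_string_list.append(og_key)
--     # convert this list to string
--     new_string = ''.join(new_string_list)
--     return new_string
-- ===== SOURCE B (Python) =====
-- def formatted_string(input_string, sorted_count):
--     # One pass over input_string groups characters by lowercase letter,
--     # then one pass over the keys concatenates the groups.
--     groups = {}
--     for c in input_string: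
--         k = c.lower()
--         groups[k] = groups.get(k, []) + [c]
--     out = []
--     for key in sorted_count:
--         out.extend(groups.get(key.lower(), []))
--     return ''.join(out)
-- ===== Notes on version B (the rewrite author's own statement) =====
-- stated objective: faster
-- what changed: B replaces A's per-key rescan of the whole input string by a single grouping pass (dict lowercase-char -> list of original chars) followed by one lookup per key.
import Mathlib
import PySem

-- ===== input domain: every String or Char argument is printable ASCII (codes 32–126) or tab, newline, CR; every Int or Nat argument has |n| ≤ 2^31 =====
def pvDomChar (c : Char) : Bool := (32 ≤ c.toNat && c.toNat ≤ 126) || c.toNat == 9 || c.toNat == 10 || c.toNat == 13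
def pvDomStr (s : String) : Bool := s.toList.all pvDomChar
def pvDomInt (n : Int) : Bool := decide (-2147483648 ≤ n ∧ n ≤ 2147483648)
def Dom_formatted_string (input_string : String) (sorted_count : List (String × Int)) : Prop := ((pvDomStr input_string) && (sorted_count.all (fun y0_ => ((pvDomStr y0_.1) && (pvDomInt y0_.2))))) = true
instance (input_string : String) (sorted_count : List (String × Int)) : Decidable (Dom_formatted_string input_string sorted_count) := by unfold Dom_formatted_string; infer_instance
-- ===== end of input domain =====

-- B groups the input's characters by lowercase once and concatenates one group per key,
-- replacing A's rescan of the whole input string for every key (objective: faster, one pass + lookups).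

-- ===== PORT A =====
def formatted_string (input_string : String) (sorted_count : List (String × Int)) : String :=
  -- for key, value in sorted_count.items(): for og_key in input_string: if key.lower()==og_key.lower(): append og_key
  let new_string_list : List Char :=
    sorted_count.foldl (fun acc kv =>
      input_string.toList.foldl (fun acc2 og_key =>
        if PySem.Str.lower kv.1 = PySem.Str.lower (String.mk [og_key]) then acc2 ++ [og_key] else acc2) acc) []
  String.mk new_string_list

-- ===== PORT B =====
def formatted_string_alt (input_string : String) (sorted_count : List (String × Int)) : String :=
  -- groups[c.lower()] = groups.get(c.lower(), []) + [c]
  let groups : PySem.Dict String (List Char) :=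
    input_string.toList.foldl
      (fun d c => d.modify (PySem.Str.lower (String.mk [c])) [] (· ++ [c])) PySem.Dict.empty
  -- for key in sorted_count: out.extend(groups.get(key.lower(), []))
  let out : List Char :=
    sorted_count.foldl (fun acc kv => acc ++ groups.getD (PySem.Str.lower kv.1) []) []
  String.mk out

-- ===== PRECONDITION & SPEC =====
def Spec_formatted_string (input_string : String) (sorted_count : List (String × Int)) (out : String) : Prop :=
  out = formatted_string_alt input_string sorted_count
instance (input_string : String) (sorted_count : List (String × Int)) (out : String) :
    Decidable (Spec_formatted_string input_string sorted_count out) := by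
  unfold Spec_formatted_string; infer_instance

-- ===== CLAIM =====
def Claim_equal_formatted_string : Prop :=
  ∀ (input_string : String) (sorted_count : List (String × Int)),
    Dom_formatted_string input_string sorted_count →
    Spec_formatted_string input_string sorted_count (formatted_string input_string sorted_count)

-- ===== LEMMAS AND PROOFS =====

-- B's grouping dict looked up at key k yields exactly the characters of s whose lowered
-- singleton string is k (the chunk A computes by rescanning s).
theorem pv_groups_getD (s : List Char) (k : String) :
    (s.foldl (fun d c => d.modify (PySem.Str.lower (String.mk [c])) [] (· ++ [c]))
        (PySem.Dict.empty : PySem.Dict String (List Char))).getD k []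
      = s.filter (fun c => PySem.Str.lower (String.mk [c]) == k) := by
  have h := PySem.Dict.getD_foldl_modify_append
      (l := s.map (fun c => (PySem.Str.lower (String.mk [c]), c)))
      (d := (PySem.Dict.empty : PySem.Dict String (List Char))) (c := k)
  rw [List.foldl_map] at h
  simpa [List.filter_map, List.map_map, Function.comp_def] using h

theorem formatted_string_spec : Claim_equal_formatted_string := by
  intro input_string sorted_count _
  unfold Spec_formatted_string formatted_string formatted_string_alt
  simp only []
  congr 1
  apply PySem.List.foldl_congr_mem
  intro acc kv _
  rw [PySem.List.foldl_append_ite_eq_filter, pv_groups_getD]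
  congr 1
  apply List.filter_congr
  intro c _
  rw [Bool.eq_iff_iff]
  simp only [beq_iff_eq, decide_eq_true_eq]
  exact eq_comm

-- ===== VERDICT =====
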